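-- pv_equiv track=rewrite | github.com/mrti259/tda-i-tps | tp1/tp1/tiempo_optimo.py | tiempo_optimo
-- ===== SOURCE A (Python) =====
-- def tiempo_optimo(tiempos_analisis):
--     tiempo_fin_maximo = 0
--     tiempo_actual = 0
--
--     tiempos_analisis = sorted(tiempos_analisis, key=lambda analisis: analisis[1], reverse=True)
--
--     for (tiempo_scaloni, tiempo_ayudante) in tiempos_analisis:
--         # Scaloni ve el video
--         tiempo_actual += tiempo_scaloni
--
--         # Cuando estaria terminado el analisis de este contricante
--         tiempo_fin_analisis_actual = tiempo_actual + tiempo_ayudante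
--
--         # Si va a ser el ultimo en terminar de analizarse me lo guardo
--         if tiempo_fin_analisis_actual > tiempo_fin_maximo:
--             tiempo_fin_maximo = tiempo_fin_analisis_actual
--
--     return tiempo_fin_maximo
-- ===== SOURCE B (Python) =====
-- def tiempo_optimo(tiempos_analisis):
--     orden = sorted(tiempos_analisis, key=lambda analisis: analisis[1], reverse=True)
--     # Backward traversal: no prefix sums and no running clock. Uses the identity
--     # max_i (s_1+...+s_i + a_i) = s_1 + max(a_1, max_j>=2 (s_2+...+s_j + a_j)),
--     # pushing each Scaloni time inside the max of the remaining suffix.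
--     fin = None
--     for tiempo_scaloni, tiempo_ayudante in reversed(orden):
--         fin = tiempo_scaloni + (tiempo_ayudante if fin is None else max(tiempo_ayudante, fin))
--     return 0 if fin is None else max(0, fin)
-- ===== Notes on version B (the rewrite author's own statement) =====
-- stated objective: alternative
-- what changed: After the same sort, B traverses the list BACKWARD with fin = s + max(a, fin), pushing each Scaloni time inside the suffix max (no running clock, no prefix sums, no running-max state), then floors at 0; A goes forward accumulating a cumulative clock and a running maximum.
import Mathlib
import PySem

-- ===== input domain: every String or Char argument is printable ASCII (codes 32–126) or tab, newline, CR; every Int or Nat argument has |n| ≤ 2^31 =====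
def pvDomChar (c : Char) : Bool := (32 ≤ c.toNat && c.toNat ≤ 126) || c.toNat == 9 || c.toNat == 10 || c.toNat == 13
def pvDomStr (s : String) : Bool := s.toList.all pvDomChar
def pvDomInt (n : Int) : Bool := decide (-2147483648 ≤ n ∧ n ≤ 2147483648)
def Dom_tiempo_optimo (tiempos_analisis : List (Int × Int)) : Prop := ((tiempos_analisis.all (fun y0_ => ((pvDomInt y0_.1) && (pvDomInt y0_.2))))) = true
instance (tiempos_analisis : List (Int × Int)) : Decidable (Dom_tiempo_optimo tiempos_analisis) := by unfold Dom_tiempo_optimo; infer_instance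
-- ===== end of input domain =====

-- B replaces the forward clock+running-max loop by a backward traversal pushing each Scaloni time inside the suffix max (alternative decomposition, same cost).


-- ===== PORT A =====
def tiempo_optimo (tiempos_analisis : List (Int × Int)) : Int :=
  let orden := PySem.List.sorted tiempos_analisis (fun analisis => analisis.2) true
  let fin := orden.foldl
    (fun (st : Int × Int) p =>
      let tiempo_actual := st.2 + p.1
      let tiempo_fin_analisis_actual := tiempo_actual + p.2
      (if tiempo_fin_analisis_actual > st.1 then tiempo_fin_analisis_actual else st.1,
       tiempo_actual))
    (0, 0)
  fin.1

-- ===== PORT B =====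
-- Source B's backward loop over reversed(orden) with the Option accumulator 'fin'
def tiempo_optimo_alt (tiempos_analisis : List (Int × Int)) : Int :=
  let orden := PySem.List.sorted tiempos_analisis (fun analisis => analisis.2) true
  let fin := orden.reverse.foldl
    (fun (fin : Option Int) p =>
      some (p.1 + (match fin with | none => p.2 | some v => max p.2 v)))
    none
  match fin with
  | none => 0
  | some f => max 0 f

-- ===== PRECONDITION & SPEC =====
def Spec_tiempo_optimo (tiempos_analisis : List (Int × Int)) (out : Int) : Prop := out = tiempo_optimo_alt tiempos_analisis
instance (tiempos_analisis : List (Int × Int)) (out : Int) : Decidable (Spec_tiempo_optimo tiempos_analisis out) := by unfold Spec_tiempo_optimo; infer_instance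

-- ===== CLAIM (what is proved, stated in full; the proofs are below) =====
def Claim_equal_tiempo_optimo : Prop := ∀ (tiempos_analisis : List (Int × Int)), Dom_tiempo_optimo tiempos_analisis → Spec_tiempo_optimo tiempos_analisis (tiempo_optimo tiempos_analisis)

-- ===== LEMMAS AND PROOFS =====

-- A's forward fused fold from state (m, c) equals B's backward suffix fold shifted by c and maxed with m.
theorem fold_fwd_eq_bwd (l : List (Int × Int)) :
    ∀ (m c : Int),
      (l.foldl
        (fun (st : Int × Int) p =>
          (if st.2 + p.1 + p.2 > st.1 then st.2 + p.1 + p.2 else st.1, st.2 + p.1))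
        (m, c)).1
      = match l.foldr
            (fun p (fin : Option Int) =>
              some (p.1 + (match fin with | none => p.2 | some v => max p.2 v)))
            none with
        | none => m
        | some v => max m (c + v) := by
  induction l with
  | nil => intro m c; simp
  | cons h t ih =>
      intro m c
      obtain ⟨s, a⟩ := h
      simp only [List.foldl_cons, List.foldr_cons]
      rw [ih]
      generalize t.foldr
          (fun p (fin : Option Int) =>
            some (p.1 + (match fin with | none => p.2 | some v => max p.2 v)))
          none = r
      cases r with
      | none =>
          simp only [max_def]
          split_ifs <;> linarith
      | some v =>
          simp only [max_def]
          split_ifs <;> linarith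

-- ===== VERDICT (by name: the statement is the Claim_ definition above) =====
theorem tiempo_optimo_spec : Claim_equal_tiempo_optimo := by
  intro ts _
  unfold Spec_tiempo_optimo tiempo_optimo tiempo_optimo_alt
  dsimp only
  rw [List.foldl_reverse, fold_fwd_eq_bwd]
  cases h : (PySem.List.sorted ts (fun analisis => analisis.2) true).foldr
      (fun p (fin : Option Int) =>
        some (p.1 + (match fin with | none => p.2 | some v => max p.2 v)))
      none with
  | none => rfl
  | some v => simp
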